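-- pv_equiv track=rewrite | github.com/spid-lab/Robust-Fingerprint-of-Location-Trajectories-Under-Differential-Privacy | evaluation.py | count_pattern_in_range
-- ===== SOURCE A (Python) =====
-- def count_pattern_in_range(dataset, pattern):
--     """
--     Count the occurrences of a pattern within a range in a dataset.
--
--     Args:
--         dataset (list): The dataset.
--         pattern (list): The pattern as a list of cells.
--
--     Returns:
--         int: The count of pattern occurrences within the range.
--     """
--     count = 0
--     for trajectory in dataset:
--         for idx, point in enumerate(trajectory):
--             x, y = point[0], point[1]
--             if (x, y) == tuple(pattern[0]):
--                 for pattern_id, cell in enumerate(pattern):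
--                     if not pattern_id:
--                         continue
--                     if idx + pattern_id < len(trajectory) and tuple(cell) == tuple((trajectory[idx + pattern_id][0], trajectory[idx + pattern_id][1])):
--                         continue
--                     else:
--                         break
--                 else:
--                     count += 1
--     return count
-- ===== SOURCE B (Python) =====
-- def count_pattern_in_range(dataset, pattern):
--     pat = [tuple(cell) for cell in pattern]
--     m = len(pat)
--     # KMP failure table: fail[q] = length of the longest proper border of pat[:q],
--     # i.e. the largest k < q with pat[:k] == pat[q-k:q]; the pattern is short, so the
--     # table is built by direct border search, and each trajectory is then scanned once.
--     fail = [0] * (m + 1)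
--     for q in range(2, m + 1):
--         k = q - 1
--         while k > 0 and pat[:k] != pat[q - k:q]:
--             k -= 1
--         fail[q] = k
--     total = 0
--     for trajectory in dataset:
--         q = 0  # length of the longest prefix of pat that is a suffix of the points read so far
--         for point in trajectory:
--             c = (point[0], point[1])
--             if q == m:
--                 q = fail[q]
--             while q > 0 and pat[q] != c:
--                 q = fail[q]
--             if pat[q] == c:
--                 q += 1
--             if q == m:
--                 total += 1
--     return total
-- ===== Notes on version B (the rewrite author's own statement) =====
-- stated objective: alternative
-- what changed: A re-verifies the whole pattern at every candidate start position (naive sliding window); B runs the KMP automaton: it precomputes the failure table of longest proper borders of the pattern once and then scans each trajectory left to right in a single pass, never re-reading a point, counting each time the automaton state reaches the full pattern length.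
import Mathlib
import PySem

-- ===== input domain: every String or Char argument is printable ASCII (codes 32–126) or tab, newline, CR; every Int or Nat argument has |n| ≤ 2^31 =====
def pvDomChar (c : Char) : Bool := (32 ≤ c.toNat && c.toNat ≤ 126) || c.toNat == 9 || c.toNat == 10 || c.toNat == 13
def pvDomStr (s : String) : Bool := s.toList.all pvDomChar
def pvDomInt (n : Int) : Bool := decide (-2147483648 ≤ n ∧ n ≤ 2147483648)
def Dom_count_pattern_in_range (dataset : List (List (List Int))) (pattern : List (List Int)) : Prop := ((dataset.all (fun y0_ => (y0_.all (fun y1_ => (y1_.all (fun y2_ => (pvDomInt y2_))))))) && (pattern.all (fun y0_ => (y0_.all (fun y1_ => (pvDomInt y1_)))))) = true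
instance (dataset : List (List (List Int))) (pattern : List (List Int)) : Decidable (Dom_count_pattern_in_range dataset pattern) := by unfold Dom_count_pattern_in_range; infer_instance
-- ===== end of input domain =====

-- B replaces A's naive sliding-window re-verification by a KMP scan: a failure table of
-- longest proper pattern borders is built once, then each trajectory is read once, left to
-- right, counting whenever the automaton state reaches the full pattern length.

-- ===== PORT A =====
-- (x, y) = (point[0], point[1]) as a list (Python tuples of ints compare componentwise, like lists)
def pvXY (p : List Int) : List Int :=
  [PySem.List.pyGetD p 0 0, PySem.List.pyGetD p 1 0]

-- A's inner 'for pattern_id, cell in enumerate(pattern): … else: count += 1' loop: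
-- returns true exactly when the loop finishes without break
def pvLoopA (traj : List (List Int)) (idx : Int) : List (Int × List Int) → Bool
  | [] => true
  | (pid, cell) :: rest =>
    if pid = 0 then pvLoopA traj idx rest
    else if idx + pid < (traj.length : Int) ∧ cell = pvXY (PySem.List.pyGetD traj (idx + pid) []) then
      pvLoopA traj idx rest
    else false

def count_pattern_in_range (dataset : List (List (List Int))) (pattern : List (List Int)) : Int :=
  dataset.foldl (fun count traj =>
    (PySem.List.enumerate traj 0).foldl (fun count ip =>
      let x := PySem.List.pyGetD ip.2 0 0
      let y := PySem.List.pyGetD ip.2 1 0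
      if PySem.List.pyGetD pattern 0 [] = [x, y] then
        if pvLoopA traj ip.1 (PySem.List.enumerate pattern 0) then count + 1 else count
      else count) count) 0

-- ===== PORT B =====
-- Source B's 'while k > 0 and pat[:k] != pat[q-k:q]: k -= 1; return k' border search
def pvFailLoop (pat : List (List Int)) (q : Nat) : Nat → Nat
  | 0 => 0
  | k+1 =>
    if PySem.List.slice pat none (some ((k+1 : Nat) : Int)) =
       PySem.List.slice pat (some ((q : Int) - ((k+1 : Nat) : Int))) (some (q : Int)) then k+1
    else pvFailLoop pat q k

-- Source B's table entry fail[q]: 0 for q ≤ 1 (the table's untouched default), else the border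
-- search started at k = q-1; ported as a function instead of a mutated list
def pvFail (pat : List (List Int)) (q : Nat) : Nat := pvFailLoop pat q (q - 1)

lemma pvFailLoop_le (pat : List (List Int)) (q k : Nat) : pvFailLoop pat q k ≤ k := by
  induction k with
  | zero => exact Nat.le_refl 0
  | succ k ih => unfold pvFailLoop; split <;> omega

lemma pvFail_lt (pat : List (List Int)) (q : Nat) (h : 0 < q) : pvFail pat q < q := by
  have := pvFailLoop_le pat q (q - 1); unfold pvFail; omega

-- Source B's 'while q > 0 and pat[q] != c: q = fail[q]'
def pvScan (pat : List (List Int)) (c : List Int) (q : Nat) : Nat :=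
  if h : 0 < q ∧ ¬ PySem.List.pyGetD pat (q : Int) [] = c then pvScan pat c (pvFail pat q)
  else q
termination_by q
decreasing_by exact pvFail_lt pat q h.1

def count_pattern_in_range_alt (dataset : List (List (List Int))) (pattern : List (List Int)) : Int :=
  let pat := pattern
  let m := pattern.length
  dataset.foldl (fun total traj =>
    (traj.foldl (fun (s : Nat × Int) point =>
      let c := [PySem.List.pyGetD point 0 0, PySem.List.pyGetD point 1 0]
      let q0 := s.1
      let q1 := if q0 = m then pvFail pat q0 else q0
      let q2 := pvScan pat c q1
      let q3 := if PySem.List.pyGetD pat (q2 : Int) [] = c then q2 + 1 else q2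
      (q3, if q3 = m then s.2 + 1 else s.2)) (0, total)).2) 0

-- ===== PRECONDITION & SPEC =====
-- Pre_ excludes exactly the inputs where the Python A raises IndexError: a reached point
-- with fewer than two coordinates, or an empty pattern together with a nonempty trajectory
-- (pattern[0] is evaluated at every point).
def Pre_count_pattern_in_range (dataset : List (List (List Int))) (pattern : List (List Int)) : Prop :=
  (∀ traj ∈ dataset, ∀ p ∈ traj, 2 ≤ p.length) ∧ (pattern = [] → ∀ traj ∈ dataset, traj = [])
instance (dataset : List (List (List Int))) (pattern : List (List Int)) : Decidable (Pre_count_pattern_in_range dataset pattern) := by unfold Pre_count_pattern_in_range; infer_instance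
def pvWitness_count_pattern_in_range : List (List (List Int)) × List (List Int) :=
  ([[[1, 2], [3, 4]]], [[1, 2], [3, 4]])

def Spec_count_pattern_in_range (dataset : List (List (List Int))) (pattern : List (List Int)) (out : Int) : Prop := out = count_pattern_in_range_alt dataset pattern
instance (dataset : List (List (List Int))) (pattern : List (List Int)) (out : Int) : Decidable (Spec_count_pattern_in_range dataset pattern out) := by unfold Spec_count_pattern_in_range; infer_instance

-- ===== CLAIM (what is proved, stated in full; the proofs are below) =====
def Claim_equal_count_pattern_in_range : Prop := ∀ (dataset : List (List (List Int))) (pattern : List (List Int)), Dom_count_pattern_in_range dataset pattern → Pre_count_pattern_in_range dataset pattern → Spec_count_pattern_in_range dataset pattern (count_pattern_in_range dataset pattern)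

-- ===== LEMMAS AND PROOFS =====

-- pts = the (x,y) projection of a trajectory
def pvPts (traj : List (List Int)) : List (List Int) :=
  traj.map pvXY

lemma pvPts_length (traj : List (List Int)) : (pvPts traj).length = traj.length := by
  simp [pvPts]

lemma pvPts_get (traj : List (List Int)) (i : Nat) (hi : i < traj.length) :
    (pvPts traj)[i]'(by simpa [pvPts_length] using hi) =
      pvXY (PySem.List.pyGetD traj (i : Int) []) := by
  simp [pvPts, pvXY, PySem.List.pyGetD_natCast, List.getElem?_eq_getElem hi]

-- nested suffixes: the shorter of two suffixes of the same list is a suffix of the longer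
lemma suffix_of_suffix_le {α : Type} (a b s : List α) (ha : a <:+ s) (hb : b <:+ s)
    (h : a.length ≤ b.length) : a <:+ b := by
  have has := ha.length_le
  have hbs := hb.length_le
  rw [List.suffix_iff_eq_drop] at ha hb ⊢
  calc a = s.drop (s.length - a.length) := ha
    _ = (s.drop (s.length - b.length)).drop (b.length - a.length) := by
        rw [List.drop_drop]; congr 1; omega
    _ = b.drop (b.length - a.length) := by rw [← hb]

-- peeling one element off parallel suffixes
lemma concat_suffix_concat {α : Type} (a s : List α) (x y : α) :
    a ++ [x] <:+ s ++ [y] ↔ a <:+ s ∧ x = y := by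
  constructor
  · intro hsuf
    have h2 := (List.reverse_prefix).mpr hsuf
    simp only [List.reverse_append, List.reverse_singleton, List.singleton_append,
      List.cons_prefix_cons] at h2
    exact ⟨List.reverse_prefix.mp h2.2, h2.1⟩
  · rintro ⟨hsuf, rfl⟩
    have h2 := (List.reverse_prefix).mpr hsuf
    apply List.reverse_prefix.mp
    simp only [List.reverse_append, List.reverse_singleton, List.singleton_append,
      List.cons_prefix_cons]
    exact ⟨trivial, h2⟩

-- the longest k ≤ |p| with p.take k a suffix of s (the KMP automaton's semantic state)
def pvLsp (p s : List (List Int)) : Nat :=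
  Nat.findGreatest (fun k => p.take k <:+ s) p.length

lemma pvLsp_le (p s : List (List Int)) : pvLsp p s ≤ p.length :=
  Nat.findGreatest_le p.length

lemma pvLsp_suffix (p s : List (List Int)) : p.take (pvLsp p s) <:+ s := by
  exact Nat.findGreatest_spec (P := fun k => p.take k <:+ s) (Nat.zero_le _) (by simp)

lemma pvLsp_max (p s : List (List Int)) (k : Nat) (hk : k ≤ p.length)
    (h : p.take k <:+ s) : k ≤ pvLsp p s :=
  Nat.le_findGreatest hk h

lemma pvLsp_nil (p : List (List Int)) : pvLsp p [] = 0 := by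
  have h := pvLsp_suffix p []
  have h2 := pvLsp_le p []
  rw [List.suffix_nil] at h
  have := congrArg List.length h
  simp only [List.length_take, List.length_nil] at this
  omega

lemma pvLsp_eq_length_iff (p s : List (List Int)) : pvLsp p s = p.length ↔ p <:+ s := by
  constructor
  · intro h
    have := pvLsp_suffix p s
    rwa [h, List.take_length] at this
  · intro h
    exact Nat.le_antisymm (pvLsp_le p s)
      (pvLsp_max p s p.length le_rfl (by rwa [List.take_length]))

-- slice condition of the border search ↔ border (suffix of a prefix)
lemma slice_cond_iff (p : List (List Int)) (q j : Nat) (hj : j ≤ q) (hq : q ≤ p.length) :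
    (PySem.List.slice p none (some ((j : Nat) : Int)) =
      PySem.List.slice p (some ((q : Int) - ((j : Nat) : Int))) (some (q : Int))) ↔
    p.take j <:+ p.take q := by
  have hcast : (q : Int) - ((j : Nat) : Int) = ((q - j : Nat) : Int) := by omega
  rw [PySem.List.slice_to_natCast, hcast, PySem.List.slice_natCast]
  have harith : q - (q - j) = j := by omega
  rw [harith]
  rw [List.suffix_iff_eq_drop]
  have hlq : (p.take q).length = q := List.length_take_of_le hq
  have hlj : (p.take j).length = j := List.length_take_of_le (le_trans hj hq)
  rw [hlq, hlj, List.drop_take, harith]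

-- the border search finds the largest border ≤ its starting point
lemma pvFailLoop_spec (p : List (List Int)) (q k : Nat) (hk : k < q) (hq : q ≤ p.length) :
    p.take (pvFailLoop p q k) <:+ p.take q ∧
    (∀ j ≤ k, p.take j <:+ p.take q → j ≤ pvFailLoop p q k) := by
  induction k with
  | zero =>
    refine ⟨by simp [pvFailLoop], ?_⟩
    intro j hj _
    simpa [pvFailLoop] using hj
  | succ k ih =>
    have hiff := slice_cond_iff p q (k + 1) (by omega) hq
    unfold pvFailLoop
    split
    · next hcond =>
      exact ⟨hiff.mp hcond, fun j hj _ => le_trans hj le_rfl⟩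
    · next hcond =>
      obtain ⟨hb, hmax⟩ := ih (by omega)
      refine ⟨hb, ?_⟩
      intro j hj hjb
      rcases Nat.lt_or_ge j (k + 1) with h | h
      · exact hmax j (by omega) hjb
      · have : j = k + 1 := by omega
        subst this
        exact absurd (hiff.mpr hjb) hcond

lemma pvFail_spec (p : List (List Int)) (q : Nat) (h1 : 1 ≤ q) (hq : q ≤ p.length) :
    pvFail p q < q ∧ p.take (pvFail p q) <:+ p.take q ∧
    (∀ j < q, p.take j <:+ p.take q → j ≤ pvFail p q) := by
  obtain ⟨hb, hmax⟩ := pvFailLoop_spec p q (q - 1) (by omega) hq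
  exact ⟨pvFail_lt p q (by omega), hb, fun j hj hjb => hmax j (by omega) hjb⟩

-- the while-descent returns the largest border of p.take q whose next pattern cell is c
lemma pvScan_spec (p : List (List Int)) (c : List Int) (q : Nat) (hq : q < p.length) :
    pvScan p c q ≤ q ∧ p.take (pvScan p c q) <:+ p.take q ∧
    (pvScan p c q = 0 ∨ PySem.List.pyGetD p ((pvScan p c q : Nat) : Int) [] = c) ∧
    (∀ j ≤ q, p.take j <:+ p.take q → PySem.List.pyGetD p ((j : Nat) : Int) [] = c →
      j ≤ pvScan p c q) := by
  induction q using Nat.strong_induction_on with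
  | _ q ih =>
  rw [pvScan]
  split
  · next h =>
    obtain ⟨hfl, hfb, hfmax⟩ := pvFail_spec p q h.1 (le_of_lt hq)
    obtain ⟨ih1, ih2, ih3, ih4⟩ := ih (pvFail p q) hfl (lt_trans hfl hq)
    refine ⟨le_trans ih1 (le_of_lt hfl), ih2.trans hfb, ih3, ?_⟩
    intro j hj hjb hjc
    rcases Nat.lt_or_ge j q with hlt | hge
    · have hjf : j ≤ pvFail p q := hfmax j hlt hjb
      have hjb' : p.take j <:+ p.take (pvFail p q) := by
        refine suffix_of_suffix_le _ _ _ hjb hfb ?_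
        rw [List.length_take_of_le (by omega), List.length_take_of_le (by omega)]
        exact hjf
      exact ih4 j hjf hjb' hjc
    · have : j = q := by omega
      subst this
      exact absurd hjc h.2
  · next h =>
    refine ⟨le_rfl, List.suffix_refl _, ?_, fun j hj _ _ => hj⟩
    by_cases h0 : q = 0
    · exact Or.inl h0
    · right
      by_contra hc
      exact h ⟨by omega, hc⟩

lemma pyGetD_eq_getElem' (p : List (List Int)) (j : Nat) (h : j < p.length) :
    PySem.List.pyGetD p ((j : Nat) : Int) [] = p[j] := by
  simp [PySem.List.pyGetD_natCast, List.getD_eq_getElem?_getD, List.getElem?_eq_getElem h]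

lemma take_succ_eq (p : List (List Int)) (i : Nat) (h : i < p.length) :
    p.take (i + 1) = p.take i ++ [p[i]] := by
  rw [← List.take_concat_get h, List.concat_eq_append]

-- one automaton step tracks the semantic state
lemma step_eq (p s : List (List Int)) (c : List Int) (hp : p ≠ []) :
    (let q1 := if pvLsp p s = p.length then pvFail p (pvLsp p s) else pvLsp p s
     let q2 := pvScan p c q1
     if PySem.List.pyGetD p ((q2 : Nat) : Int) [] = c then q2 + 1 else q2) =
    pvLsp p (s ++ [c]) := by
  have hm : 0 < p.length := List.length_pos_iff.mpr hp
  have hq0le : pvLsp p s ≤ p.length := pvLsp_le p s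
  dsimp only
  set q1 := if pvLsp p s = p.length then pvFail p (pvLsp p s) else pvLsp p s with hq1def
  have hq1lt : q1 < p.length := by
    rw [hq1def]; split
    · next hEq => calc pvFail p (pvLsp p s) < pvLsp p s := pvFail_lt p _ (by omega)
        _ ≤ p.length := hq0le
    · next hNe => omega
  have hX1 : ∀ j, p.take j <:+ p.take q1 → p.take j <:+ s := by
    intro j hj
    rw [hq1def] at hj
    revert hj; split
    · next hEq =>
      intro hj
      have h1 : p.take (pvFail p (pvLsp p s)) <:+ p.take (pvLsp p s) :=
        (pvFail_spec p (pvLsp p s) (by omega) hq0le).2.1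
      have h2 : p.take j <:+ p.take (pvLsp p s) := hj.trans h1
      rw [hEq, List.take_length] at h2
      exact h2.trans ((pvLsp_eq_length_iff p s).mp hEq)
    · next hNe =>
      intro hj
      exact hj.trans (pvLsp_suffix p s)
  have hX2 : ∀ j, j < p.length → p.take j <:+ s → j ≤ q1 ∧ p.take j <:+ p.take q1 := by
    intro j hjm hjs
    have hjq0 : j ≤ pvLsp p s := pvLsp_max p s j (by omega) hjs
    rw [hq1def]; split
    · next hEq =>
      have hpm : p <:+ s := (pvLsp_eq_length_iff p s).mp hEq
      have hjp : p.take j <:+ p.take (pvLsp p s) := by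
        rw [hEq, List.take_length]
        exact suffix_of_suffix_le _ _ _ hjs hpm (by rw [List.length_take]; omega)
      obtain ⟨hfl, hfb, hfmax⟩ := pvFail_spec p (pvLsp p s) (by omega) hq0le
      have hjf : j ≤ pvFail p (pvLsp p s) := hfmax j (by omega) hjp
      refine ⟨hjf, ?_⟩
      exact suffix_of_suffix_le _ _ _ hjp hfb
        (by rw [List.length_take, List.length_take]; omega)
    · next hNe =>
      refine ⟨hjq0, ?_⟩
      exact suffix_of_suffix_le _ _ _ hjs (pvLsp_suffix p s)
        (by rw [List.length_take, List.length_take]; omega)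
  obtain ⟨hw_le, hw_b, hw0c, hwmax⟩ := pvScan_spec p c q1 hq1lt
  set w := pvScan p c q1 with hwdef
  have hwlt : w < p.length := by omega
  apply Nat.le_antisymm
  · split
    · next hwc =>
      apply pvLsp_max p (s ++ [c]) (w + 1) (by omega)
      rw [take_succ_eq p w hwlt, concat_suffix_concat]
      exact ⟨hX1 w hw_b, by rw [← pyGetD_eq_getElem' p w hwlt]; exact hwc⟩
    · next hwc =>
      have hw0 : w = 0 := by
        rcases hw0c with h | h
        · exact h
        · exact absurd h hwc
      rw [hw0]
      exact Nat.zero_le _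
  · have hLs := pvLsp_suffix p (s ++ [c])
    have hLle := pvLsp_le p (s ++ [c])
    by_cases hL0 : pvLsp p (s ++ [c]) = 0
    · split <;> omega
    · obtain ⟨i, hi⟩ := Nat.exists_eq_succ_of_ne_zero hL0
      have him : i < p.length := by omega
      rw [hi, take_succ_eq p i him, concat_suffix_concat] at hLs
      obtain ⟨his, hic⟩ := hLs
      obtain ⟨hiq1, hib⟩ := hX2 i him his
      have hicg : PySem.List.pyGetD p ((i : Nat) : Int) [] = c := by
        rw [pyGetD_eq_getElem' p i him]; exact hic
      have hiw : i ≤ w := hwmax i hiq1 hib hicg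
      split
      · next => omega
      · next hwc =>
        exfalso
        have hw0 : w = 0 := by
          rcases hw0c with h | h
          · exact h
          · exact absurd h hwc
        have hi0 : i = 0 := by omega
        apply hwc
        rw [hw0, ← hi0]
        exact hicg

-- occurrences counted by ending position
def pvOcc (p s : List (List Int)) : Int :=
  ((List.range (s.length + 1)).countP (fun e => decide (p <:+ s.take e)) : Int)

lemma pvOcc_nil (p : List (List Int)) (hp : p ≠ []) : pvOcc p [] = 0 := by
  simp [pvOcc, List.suffix_nil, hp]

lemma pvOcc_append (p s : List (List Int)) (c : List Int) :
    pvOcc p (s ++ [c]) = pvOcc p s + (if p <:+ s ++ [c] then 1 else 0) := by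
  unfold pvOcc
  have hlen : (s ++ [c]).length = s.length + 1 := by simp
  rw [hlen, List.range_succ, List.countP_append]
  have h1 : (List.range (s.length + 1)).countP (fun e => decide (p <:+ (s ++ [c]).take e)) =
      (List.range (s.length + 1)).countP (fun e => decide (p <:+ s.take e)) := by
    apply List.countP_congr
    intro e he
    rw [List.mem_range] at he
    rw [List.take_append_of_le_length (by omega)]
  have h2 : ([s.length + 1].countP (fun e => decide (p <:+ (s ++ [c]).take e))) =
      (if p <:+ s ++ [c] then 1 else 0) := by
    have : (s ++ [c]).take (s.length + 1) = s ++ [c] := List.take_of_length_le (by simp)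
    simp only [List.countP_cons, List.countP_nil, this]
    split <;> simp_all
  rw [h1, h2]
  push_cast
  ring

-- B's inner fold, in terms of the projected points
lemma scan_fold (p : List (List Int)) (hp : p ≠ []) (l : List (List Int)) :
    ∀ (s : List (List Int)) (t : Int),
    l.foldl (fun (st : Nat × Int) c =>
      let q1 := if st.1 = p.length then pvFail p st.1 else st.1
      let q2 := pvScan p c q1
      let q3 := if PySem.List.pyGetD p ((q2 : Nat) : Int) [] = c then q2 + 1 else q2
      (q3, if q3 = p.length then st.2 + 1 else st.2)) (pvLsp p s, t) =
    (pvLsp p (s ++ l), t + (pvOcc p (s ++ l) - pvOcc p s)) := by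
  induction l with
  | nil =>
    intro s t
    simp
  | cons c l ih =>
    intro s t
    rw [List.foldl_cons]
    have hstep := step_eq p s c hp
    dsimp only at hstep ⊢
    rw [hstep]
    have hsnd : (if pvLsp p (s ++ [c]) = p.length then t + 1 else t) =
        t + (pvOcc p (s ++ [c]) - pvOcc p s) := by
      rw [pvOcc_append p s c]
      by_cases h : p <:+ s ++ [c]
      · rw [if_pos ((pvLsp_eq_length_iff p (s ++ [c])).mpr h), if_pos h]; ring
      · rw [if_neg (fun hh => h ((pvLsp_eq_length_iff p (s ++ [c])).mp hh)), if_neg h]; ring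
    rw [hsnd, ih (s ++ [c]) (t + (pvOcc p (s ++ [c]) - pvOcc p s))]
    simp only [List.append_assoc, List.singleton_append, Prod.mk.injEq]
    exact ⟨trivial, by ring⟩

-- start-position count (what A computes) = ending-position count (what B computes)
lemma start_eq_end (p t : List (List Int)) (hp : p ≠ []) :
    ((List.range t.length).countP (fun K => decide (p <+: t.drop K)) : Int) = pvOcc p t := by
  have hm : 0 < p.length := List.length_pos_iff.mpr hp
  suffices hnat : (List.range t.length).countP (fun K => decide (p <+: t.drop K)) =
      (List.range (t.length + 1)).countP (fun e => decide (p <:+ t.take e)) by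
    unfold pvOcc
    exact_mod_cast hnat
  by_cases hmn : p.length ≤ t.length
  · have hsplitL : t.length = (t.length + 1 - p.length) + (p.length - 1) := by omega
    have hsplitR : t.length + 1 = p.length + (t.length + 1 - p.length) := by omega
    have hL : (List.range t.length).countP (fun K => decide (p <+: t.drop K)) =
        (List.range (t.length + 1 - p.length)).countP (fun K => decide (p <+: t.drop K)) := by
      conv_lhs => rw [hsplitL]
      rw [List.range_add, List.countP_append]
      have hz : (List.map (fun x => (t.length + 1 - p.length) + x)
          (List.range (p.length - 1))).countP (fun K => decide (p <+: t.drop K)) = 0 := by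
        rw [List.countP_eq_zero]
        intro a ha
        simp only [List.mem_map, List.mem_range] at ha
        obtain ⟨x, hx, rfl⟩ := ha
        simp only [decide_eq_true_eq]
        intro hpre
        have := hpre.length_le
        rw [List.length_drop] at this
        omega
      rw [hz, Nat.add_zero]
    have hR : (List.range (t.length + 1)).countP (fun e => decide (p <:+ t.take e)) =
        (List.range (t.length + 1 - p.length)).countP
          (fun K => decide (p <:+ t.take (p.length + K))) := by
      conv_lhs => rw [hsplitR]
      rw [List.range_add, List.countP_append, List.countP_map]
      have hz : (List.range p.length).countP (fun e => decide (p <:+ t.take e)) = 0 := by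
        rw [List.countP_eq_zero]
        intro e he
        rw [List.mem_range] at he
        simp only [decide_eq_true_eq]
        intro hsuf
        have := hsuf.length_le
        rw [List.length_take] at this
        omega
      rw [hz, Nat.zero_add]
      rfl
    rw [hL, hR]
    apply List.countP_congr
    intro K hK
    rw [List.mem_range] at hK
    simp only [decide_eq_true_eq]
    have hk : p.length + K ≤ t.length := by omega
    rw [List.prefix_iff_eq_take, List.suffix_iff_eq_drop, List.length_take_of_le hk]
    have h1 : p.length + K - p.length = K := by omega
    rw [h1, List.drop_take]
    have h2 : p.length + K - K = p.length := by omega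
    rw [h2]
  · have hz1 : (List.range t.length).countP (fun K => decide (p <+: t.drop K)) = 0 := by
      rw [List.countP_eq_zero]
      intro K hK
      rw [List.mem_range] at hK
      simp only [decide_eq_true_eq]
      intro hpre
      have := hpre.length_le
      rw [List.length_drop] at this
      omega
    have hz2 : (List.range (t.length + 1)).countP (fun e => decide (p <:+ t.take e)) = 0 := by
      rw [List.countP_eq_zero]
      intro e he
      rw [List.mem_range] at he
      simp only [decide_eq_true_eq]
      intro hsuf
      have := hsuf.length_le
      rw [List.length_take] at this
      omega
    rw [hz1, hz2]

-- A's inner loop as an 'all' over the enumerated pattern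
lemma pvLoopA_eq_all (traj : List (List Int)) (idx : Int) (es : List (Int × List Int)) :
    pvLoopA traj idx es =
      es.all (fun pc => pc.1 == 0 ||
        decide (idx + pc.1 < (traj.length : Int) ∧
                pc.2 = pvXY (PySem.List.pyGetD traj (idx + pc.1) []))) := by
  induction es with
  | nil => rfl
  | cons pc rest ih =>
    obtain ⟨pid, cell⟩ := pc
    by_cases h0 : pid = 0
    · simp [pvLoopA, h0, ih]
    · by_cases h1 : idx + pid < (traj.length : Int) ∧
          cell = pvXY (PySem.List.pyGetD traj (idx + pid) [])
      · simp [pvLoopA, h0, h1, ih]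
      · simp [pvLoopA, h0, h1]

-- A's guard + inner loop at index K ↔ the pattern occurs at K (from the projected points)
lemma condA_iff_prefix (traj pattern : List (List Int)) (K : Nat)
    (hK : K < traj.length) (hpat : pattern ≠ []) :
    (PySem.List.pyGetD pattern 0 [] = pvXY (PySem.List.pyGetD traj (K : Int) []) ∧
      pvLoopA traj (K : Int) (PySem.List.enumerate pattern 0) = true) ↔
    pattern <+: (pvPts traj).drop K := by
  have hm : 0 < pattern.length := List.length_pos_iff.mpr hpat
  have hpat0 : PySem.List.pyGetD pattern 0 [] = pattern[0]'hm := by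
    simp [PySem.List.pyGetD_zero, List.getElem?_eq_getElem hm]
  rw [pvLoopA_eq_all, List.all_eq_true]
  constructor
  · rintro ⟨hg, hall⟩
    rw [List.prefix_iff_getElem?]
    intro i hi
    rw [List.getElem?_drop]
    rcases Nat.eq_zero_or_pos i with h0 | h0
    · subst h0
      have : K + 0 < (pvPts traj).length := by simpa [pvPts_length] using hK
      rw [List.getElem?_eq_getElem this]
      simp only [Nat.add_zero] at this ⊢
      rw [pvPts_get traj K hK, ← hg, hpat0]
    · have hmem : ((0 : Int) + (i : Nat), pattern[i]) ∈ PySem.List.enumerate pattern 0 :=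
        (PySem.List.mem_enumerate_iff pattern 0 _).mpr ⟨i, hi, rfl⟩
      have h := hall _ hmem
      have hiz : ¬ ((0 : Int) + (i : Nat) = 0) := by
        omega
      simp only [zero_add] at h
      rw [Bool.or_eq_true, beq_iff_eq] at h
      rcases h with h | h
      · exact absurd (by simpa using h) hiz
      · rw [decide_eq_true_iff] at h
        obtain ⟨hlt, hval⟩ := h
        have hKi : K + i < traj.length := by exact_mod_cast (by push_cast at hlt ⊢; omega : ((K + i : Nat) : Int) < (traj.length : Int))
        have : K + i < (pvPts traj).length := by simpa [pvPts_length] using hKi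
        rw [List.getElem?_eq_getElem this, pvPts_get traj (K + i) hKi]
        have hcast : (K : Int) + (i : Nat) = ((K + i : Nat) : Int) := by push_cast; ring
        rw [hcast] at hval
        rw [← hval]
  · intro h
    have hlen : pattern.length ≤ traj.length - K := by
      have := h.length_le
      simpa [pvPts_length] using this
    have hgetp : ∀ (i : Nat) (hi : i < pattern.length),
        pattern[i]'hi = pvXY (PySem.List.pyGetD traj ((K : Int) + (i : Nat)) []) := by
      intro i hi
      have hKi : K + i < traj.length := by omega
      have h1 : pattern[i]'hi = ((pvPts traj).drop K)[i]'(by simp [pvPts_length]; omega) :=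
        h.getElem hi
      rw [List.getElem_drop] at h1
      rw [h1]
      have := pvPts_get traj (K + i) hKi
      rw [this]; norm_cast
    constructor
    · rw [hpat0]
      have := hgetp 0 hm
      simpa using this
    · intro pc hpc
      rw [PySem.List.mem_enumerate_iff] at hpc
      obtain ⟨i, hi, rfl⟩ := hpc
      simp only [zero_add]
      rw [Bool.or_eq_true, beq_iff_eq]
      rcases Nat.eq_zero_or_pos i with h0 | h0
      · left; simp [h0]
      · right
        rw [decide_eq_true_iff]
        refine ⟨?_, hgetp i hi⟩
        have : K + i < traj.length := by omega
        omega

-- A's per-trajectory loop counts the occurrence start positions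
lemma trajA_eq (traj pattern : List (List Int)) (c : Int) (hpat : pattern ≠ []) :
    (PySem.List.enumerate traj 0).foldl (fun count ip =>
      if PySem.List.pyGetD pattern 0 [] =
          [PySem.List.pyGetD ip.2 0 0, PySem.List.pyGetD ip.2 1 0] then
        if pvLoopA traj ip.1 (PySem.List.enumerate pattern 0) then count + 1 else count
      else count) c =
    c + ((List.range (pvPts traj).length).countP
          (fun K => decide (pattern <+: (pvPts traj).drop K)) : Int) := by
  have hbody : ∀ (acc : Int), ∀ j ∈ PySem.List.pyRange 0 (PySem.List.len traj) 1,
      (fun (count : Int) (ip : Int × List Int) =>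
        if PySem.List.pyGetD pattern 0 [] =
            [PySem.List.pyGetD ip.2 0 0, PySem.List.pyGetD ip.2 1 0] then
          if pvLoopA traj ip.1 (PySem.List.enumerate pattern 0) then count + 1 else count
        else count) acc (j, PySem.List.pyGetD traj j []) =
      (fun (count : Int) (j : Int) =>
        if pattern <+: (pvPts traj).drop j.toNat then count + 1 else count) acc j := by
    intro acc j hj
    rw [PySem.List.mem_pyRange_one] at hj
    simp only [PySem.List.len_eq] at hj
    obtain ⟨K, rfl⟩ : ∃ K : Nat, j = (K : Int) := ⟨j.toNat, (Int.toNat_of_nonneg hj.1).symm⟩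
    have hK : K < traj.length := by exact_mod_cast hj.2
    have hiff := condA_iff_prefix traj pattern K hK hpat
    simp only [pvXY] at hiff
    simp only [Int.toNat_natCast]
    by_cases hpre : pattern <+: (pvPts traj).drop K
    · obtain ⟨hg, hl⟩ := hiff.mpr hpre
      rw [if_pos hg, if_pos hl, if_pos hpre]
    · rw [if_neg hpre]
      by_cases hg : PySem.List.pyGetD pattern 0 [] =
          [PySem.List.pyGetD (PySem.List.pyGetD traj (K : Int) []) 0 0,
           PySem.List.pyGetD (PySem.List.pyGetD traj (K : Int) []) 1 0]
      · rw [if_pos hg, if_neg (fun hl => hpre (hiff.mp ⟨hg, hl⟩))]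
      · rw [if_neg hg]
  rw [PySem.List.enumerate_eq_map_pyRange traj [], List.foldl_map]
  rw [PySem.List.foldl_congr_mem _ _
    (fun (count : Int) (j : Int) =>
      if pattern <+: (pvPts traj).drop j.toNat then count + 1 else count) c hbody]
  rw [PySem.List.pyRange_one, List.foldl_map]
  have hn : ((PySem.List.len traj) - 0).toNat = traj.length := by
    simp [PySem.List.len_eq]
  rw [hn]
  rw [PySem.List.foldl_congr_mem _ _
    (fun (acc : Int) (K : Nat) =>
      if (fun K : Nat => decide (pattern <+: (pvPts traj).drop K)) K = true then acc + 1
      else acc) c (by intro acc K hK; simp)]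
  rw [PySem.List.foldl_count_if]
  rw [pvPts_length]

-- B's per-trajectory loop counts the occurrence end positions
lemma trajB_eq (traj pattern : List (List Int)) (t : Int) (hpat : pattern ≠ []) :
    (traj.foldl (fun (s : Nat × Int) point =>
      let c := [PySem.List.pyGetD point 0 0, PySem.List.pyGetD point 1 0]
      let q0 := s.1
      let q1 := if q0 = pattern.length then pvFail pattern q0 else q0
      let q2 := pvScan pattern c q1
      let q3 := if PySem.List.pyGetD pattern (q2 : Int) [] = c then q2 + 1 else q2
      (q3, if q3 = pattern.length then s.2 + 1 else s.2)) (0, t)).2 =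
    t + pvOcc pattern (pvPts traj) := by
  have hpair : (traj.foldl (fun (s : Nat × Int) point =>
      let c := [PySem.List.pyGetD point 0 0, PySem.List.pyGetD point 1 0]
      let q0 := s.1
      let q1 := if q0 = pattern.length then pvFail pattern q0 else q0
      let q2 := pvScan pattern c q1
      let q3 := if PySem.List.pyGetD pattern (q2 : Int) [] = c then q2 + 1 else q2
      (q3, if q3 = pattern.length then s.2 + 1 else s.2)) ((0 : Nat), t)) =
      (pvLsp pattern (pvPts traj),
        t + (pvOcc pattern (pvPts traj) - pvOcc pattern [])) := by
    have hs := scan_fold pattern hpat (pvPts traj) [] t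
    rw [List.nil_append, pvLsp_nil] at hs
    rw [← hs, pvPts, List.foldl_map]
    rfl
  rw [hpair, pvOcc_nil pattern hpat]
  simp

-- ===== VERDICT (by name: the statement is the Claim_ definition above) =====
theorem count_pattern_in_range_spec : Claim_equal_count_pattern_in_range := by
  intro dataset pattern _hdom hpre
  obtain ⟨_hlen2, hemp⟩ := hpre
  unfold Spec_count_pattern_in_range count_pattern_in_range count_pattern_in_range_alt
  apply PySem.List.foldl_congr_mem dataset _ _ 0
  intro acc traj htraj
  by_cases hpat : pattern = []
  · rw [hemp hpat traj htraj]
    rfl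
  · calc (PySem.List.enumerate traj 0).foldl (fun count ip =>
        let x := PySem.List.pyGetD ip.2 0 0
        let y := PySem.List.pyGetD ip.2 1 0
        if PySem.List.pyGetD pattern 0 [] = [x, y] then
          if pvLoopA traj ip.1 (PySem.List.enumerate pattern 0) then count + 1 else count
        else count) acc
        = acc + ((List.range (pvPts traj).length).countP
            (fun K => decide (pattern <+: (pvPts traj).drop K)) : Int) :=
          trajA_eq traj pattern acc hpat
      _ = acc + pvOcc pattern (pvPts traj) := by
          rw [start_eq_end pattern (pvPts traj) hpat]
      _ = (traj.foldl (fun (s : Nat × Int) point =>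
            let c := [PySem.List.pyGetD point 0 0, PySem.List.pyGetD point 1 0]
            let q0 := s.1
            let q1 := if q0 = pattern.length then pvFail pattern q0 else q0
            let q2 := pvScan pattern c q1
            let q3 := if PySem.List.pyGetD pattern (q2 : Int) [] = c then q2 + 1 else q2
            (q3, if q3 = pattern.length then s.2 + 1 else s.2)) (0, acc)).2 :=
          (trajB_eq traj pattern acc hpat).symm
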